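-- pv_equiv track=rewrite | github.com/shin526/Shin | algorithm/replaceSpace.py | replaceSpace
-- ===== SOURCE A (Python) =====
-- def replaceSpace(s: str):
--     spaceCount = s.count(' ')
--     res = list(s)
--     # 每个空格扩充两个位置
--     res.extend([' '] * spaceCount * 2)
--     i = len(s) - 1
--     j = len(res) - 1
--     while i >= 0:
--         if res[i] != ' ':
--             res[j] = res[i]
--             j -= 1
--         else:
--             res[j - 2:j + 1] = '%20'
--             j -= 3
--         i -= 1
--     return ''.join(res)
-- ===== SOURCE B (Python) =====
-- def replaceSpace(s: str):
--     out = []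
--     for c in s:
--         if c == ' ':
--             out.append('%20')
--         else:
--             out.append(c)
--     return ''.join(out)
-- ===== Notes on version B (the rewrite author's own statement) =====
-- stated objective: simpler
-- what changed: B is a single forward pass appending the three escape characters or the character itself to an output list and joining, replacing A's space pre-count, over-allocation and backward two-pointer in-place fill.
import Mathlib
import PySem

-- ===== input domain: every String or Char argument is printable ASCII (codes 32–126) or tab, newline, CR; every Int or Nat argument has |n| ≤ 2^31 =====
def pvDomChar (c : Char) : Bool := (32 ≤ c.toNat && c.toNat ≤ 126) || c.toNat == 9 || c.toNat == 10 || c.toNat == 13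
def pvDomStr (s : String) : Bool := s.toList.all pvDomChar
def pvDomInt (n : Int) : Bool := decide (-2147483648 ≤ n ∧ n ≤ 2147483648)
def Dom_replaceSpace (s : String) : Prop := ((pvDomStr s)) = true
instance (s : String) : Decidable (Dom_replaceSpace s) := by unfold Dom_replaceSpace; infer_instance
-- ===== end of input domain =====

-- B replaces A's space pre-count + over-allocation + backward two-pointer in-place fill by a
-- single forward pass appending the replacement or the character to an output list (objective: simpler; measured constant-factor faster).

-- ===== PORT A =====
-- A's backward while-loop.  Python's slice assignment `res[j-2:j+1] = '%20'` always targets three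
-- in-range cells on every state A reaches (j - i = 2 * spaces left in s[:i+1] ≥ 2 when s[i] is a
-- space), so it is ported exactly as the three element writes res[j]='0', res[j-1]='2', res[j-2]='%'.
def pvLoopA (res : List Char) (i j : Int) : List Char :=
  if _h : 0 ≤ i then
    if PySem.List.pyGetD res i ' ' ≠ ' ' then
      pvLoopA (PySem.List.pySetD res j (PySem.List.pyGetD res i ' ')) (i - 1) (j - 1)
    else
      pvLoopA (PySem.List.pySetD (PySem.List.pySetD (PySem.List.pySetD res j '0') (j - 1) '2')
        (j - 2) '%') (i - 1) (j - 3)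
  else res
termination_by (i + 1).toNat
decreasing_by all_goals omega

def replaceSpace (s : String) : String :=
  let spaceCount : Nat := PySem.Str.count s " "
  let res : List Char := s.toList ++ List.replicate (spaceCount * 2) ' '
  -- ''.join(res) over a list of single characters = String.ofList
  String.ofList (pvLoopA res (PySem.Str.len s - 1) ((res.length : Int) - 1))

-- ===== PORT B =====
def replaceSpace_alt (s : String) : String :=
  -- out = []; for c in s: append '%20' or c; ''.join(out)  (the join concatenates the pieces)
  String.ofList (s.toList.foldl (fun out c => if c = ' ' then out ++ ['%', '2', '0'] else out ++ [c]) [])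

-- ===== PRECONDITION & SPEC =====
def Spec_replaceSpace (s : String) (out : String) : Prop := out = replaceSpace_alt s
instance (s : String) (out : String) : Decidable (Spec_replaceSpace s out) := by unfold Spec_replaceSpace; infer_instance

-- ===== CLAIM (what is proved, stated in full; the proofs are below) =====
def Claim_equal_replaceSpace : Prop := ∀ (s : String), Dom_replaceSpace s → Spec_replaceSpace s (replaceSpace s)

-- ===== LEMMAS AND PROOFS =====

-- s.count(' ') counts single-character occurrences = List.count
lemma pvCountGo (c : Char) : ∀ (l : List Char) (fuel acc : Nat), l.length ≤ fuel →
    PySem.Chars.count.go [c] fuel l acc = acc + l.count c := by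
  intro l
  induction l with
  | nil => intro fuel acc _; cases fuel <;> simp [PySem.Chars.count.go]
  | cons a t ih =>
    intro fuel acc h
    cases fuel with
    | zero => simp at h
    | succ n =>
      rw [PySem.Chars.count.go]
      by_cases hac : a = c
      · subst hac
        simp only [List.isPrefixOf, BEq.rfl, Bool.true_and, if_true]
        rw [show List.drop [a].length (a :: t) = t from rfl]
        rw [ih n (acc + 1) (by simpa using h)]
        simp
        omega
      · have : ([c].isPrefixOf (a :: t)) = false := by
          simp [List.isPrefixOf]
          exact fun hca => absurd hca.symm hac
        rw [this]
        simp only [Bool.false_eq_true, if_false]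
        rw [ih n acc (by simpa using h)]
        simp [hac]

lemma pvCountSingle (l : List Char) (c : Char) : PySem.Chars.count l [c] = l.count c := by
  rw [PySem.Chars.count]
  simp [pvCountGo c l l.length 0 le_rfl]

-- setting the last three cells of xs (k = xs.length - 1 ≥ 2)
lemma pvSet1 (xs : List Char) (k : Nat) (hk : k < xs.length) (c : Char) :
    xs.set k c = xs.take k ++ [c] ++ xs.drop (k + 1) := by
  rw [List.set_eq_take_append_cons_drop]
  simp [hk]

lemma pvSet3 (xs : List Char) (k : Nat) (h2 : 2 ≤ k) (hk : k < xs.length) (a b c : Char) :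
    ((xs.set k c).set (k - 1) b).set (k - 2) a
      = xs.take (k - 2) ++ [a, b, c] ++ xs.drop (k + 1) := by
  have hlen : (xs.take k).length = k := by simp; omega
  rw [pvSet1 xs k hk c, List.append_assoc,
      List.set_append_left _ _ (by omega),
      pvSet1 (xs.take k) (k - 1) (by omega) b]
  have e1 : (xs.take k).take (k - 1) = xs.take (k - 1) := by rw [List.take_take]; congr 1; omega
  have e2 : (xs.take k).drop (k - 1 + 1) = [] := by apply List.drop_eq_nil_of_le; omega
  rw [e1, e2]
  have hlen1 : (xs.take (k - 1)).length = k - 1 := by simp; omega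
  simp only [List.append_nil, List.append_assoc]
  rw [List.set_append_left _ _ (by omega),
      pvSet1 (xs.take (k - 1)) (k - 2) (by omega) a]
  have e3 : (xs.take (k - 1)).take (k - 2) = xs.take (k - 2) := by rw [List.take_take]; congr 1; omega
  have e4 : (xs.take (k - 1)).drop (k - 2 + 1) = [] := by apply List.drop_eq_nil_of_le; omega
  rw [e3, e4]; simp

lemma pvSetMid (l ys : List Char) (k : Nat) (v : Char) :
    (l ++ ys).set (l.length + k) v = l ++ ys.set k v := by
  rw [List.set_append_right _ _ (by omega), Nat.add_sub_cancel_left]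

-- the loop invariant: the untouched prefix `pre` plus a scratch pad of the right length plus the
-- already-produced suffix `done`
lemma pvLoopA_inv : ∀ (pre pad done : List Char),
    pad.length = 2 * pre.count ' ' →
    pvLoopA (pre ++ pad ++ done) ((pre.length : Int) - 1)
        ((pre.length : Int) + ((pad.length : Nat) : Int) - 1)
      = pre.flatMap (fun c => if c = ' ' then ['%', '2', '0'] else [c]) ++ done := by
  intro pre
  induction pre using List.reverseRecOn with
  | nil =>
    intro pad done h
    have : pad = [] := by simpa using h
    subst this
    rw [pvLoopA]
    simp
  | append_singleton l c ih =>
    intro pad done h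
    have hi : (((l ++ [c]).length : Nat) : Int) - 1 = ((l.length : Nat) : Int) := by simp
    have hj : (((l ++ [c]).length : Nat) : Int) + ((pad.length : Nat) : Int) - 1
        = (((l.length + pad.length : Nat)) : Int) := by simp; omega
    rw [hi, hj, pvLoopA, dif_pos (by positivity)]
    have hres : l ++ [c] ++ pad ++ done = l ++ (([c] ++ pad) ++ done) := by simp
    rw [hres]
    have hget : PySem.List.pyGetD (l ++ (([c] ++ pad) ++ done)) ((l.length : Nat) : Int) ' ' = c := by
      simp only [PySem.List.pyGetD_natCast]
      rw [List.getD_append_right _ _ _ _ le_rfl]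
      simp
    rw [hget]
    have hseg : ∀ v : Char, (l ++ (([c] ++ pad) ++ done)).set (l.length + pad.length) v
        = l ++ (([c] ++ pad).set pad.length v ++ done) := by
      intro v
      rw [pvSetMid, List.set_append_left _ _ (by simp)]
    by_cases hc : c = ' '
    · -- c is a space: the slice write '%20'
      subst hc
      rw [if_neg (by simp)]
      have hp2 : pad.length = 2 * l.count ' ' + 2 := by
        have h2 := h
        simp [List.count_append] at h2
        omega
      have e1 : ((l.length + pad.length : Nat) : Int) - 1
          = ((l.length + (pad.length - 1) : Nat) : Int) := by omega
      have e2 : ((l.length + pad.length : Nat) : Int) - 2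
          = ((l.length + (pad.length - 2) : Nat) : Int) := by omega
      rw [e1, e2]
      simp only [PySem.List.pySetD_natCast]
      rw [hseg '0', pvSetMid, pvSetMid,
          List.set_append_left _ _
            (by simp only [List.length_set, List.length_append, List.length_cons,
              List.length_nil]; omega),
          List.set_append_left _ _
            (by simp only [List.length_set, List.length_append, List.length_cons,
              List.length_nil]; omega),
          pvSet3 ([' '] ++ pad) pad.length (by omega)
            (by simp only [List.length_append, List.length_cons, List.length_nil]; omega) '%' '2' '0',
          List.drop_eq_nil_of_le
            (by simp only [List.length_append, List.length_cons, List.length_nil]; omega)]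
      have hpad' : (([' '] ++ pad).take (pad.length - 2)).length = 2 * l.count ' ' := by
        simp only [List.length_take, List.length_append, List.length_cons, List.length_nil]
        omega
      have hre : l ++ ((([' '] ++ pad).take (pad.length - 2) ++ ['%', '2', '0'] ++ []) ++ done)
          = l ++ ([' '] ++ pad).take (pad.length - 2) ++ (['%', '2', '0'] ++ done) := by simp
      rw [hre]
      have hidx3 : ((l.length + pad.length : Nat) : Int) - 3
          = ((l.length : Nat) : Int)
            + (((([' '] ++ pad).take (pad.length - 2)).length : Nat) : Int) - 1 := by
        rw [hpad']
        omega
      rw [hidx3, ih _ (['%', '2', '0'] ++ done) hpad']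
      simp
    · -- c is not a space: copied through
      rw [if_pos (by simpa using hc)]
      simp only [PySem.List.pySetD_natCast]
      rw [hseg c]
      have hcnt : pad.length = 2 * l.count ' ' := by
        have h2 := h
        simp [List.count_append, hc] at h2
        omega
      rw [pvSet1 ([c] ++ pad) pad.length (by simp) c,
          List.drop_eq_nil_of_le (by simp)]
      have hpad' : (([c] ++ pad).take pad.length).length = 2 * l.count ' ' := by
        simp only [List.length_take, List.length_append, List.length_cons, List.length_nil]
        omega
      have hre : l ++ ((([c] ++ pad).take pad.length ++ [c] ++ []) ++ done)
          = l ++ ([c] ++ pad).take pad.length ++ ([c] ++ done) := by simp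
      rw [hre]
      have hidx : ((l.length + pad.length : Nat) : Int) - 1
          = ((l.length : Nat) : Int) + (((([c] ++ pad).take pad.length).length : Nat) : Int) - 1 := by
        rw [hpad', hcnt]
        push_cast
        ring
      rw [hidx, ih _ ([c] ++ done) hpad']
      simp [hc]

-- ===== VERDICT (by name: the statement is the Claim_ definition above) =====
theorem replaceSpace_spec : Claim_equal_replaceSpace := by
  unfold Claim_equal_replaceSpace
  intro s _
  unfold Spec_replaceSpace replaceSpace replaceSpace_alt
  have hcnt : PySem.Str.count s " " = s.toList.count ' ' := by
    rw [PySem.Str.count_eq]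
    exact pvCountSingle _ _
  have hfold : (fun (out : List Char) (c : Char) =>
        if c = ' ' then out ++ ['%', '2', '0'] else out ++ [c])
      = fun out c => out ++ (if c = ' ' then ['%', '2', '0'] else [c]) := by
    funext out c
    split <;> rfl
  have hinv := pvLoopA_inv s.toList (List.replicate (PySem.Str.count s " " * 2) ' ') []
    (by simp only [List.length_replicate]; rw [hcnt]; ring)
  rw [List.append_nil] at hinv
  have hi : PySem.Str.len s - 1 = ((s.toList.length : Nat) : Int) - 1 := by
    rw [PySem.Str.len_eq]
  have hj : (((s.toList ++ List.replicate (PySem.Str.count s " " * 2) ' ').length : Nat) : Int) - 1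
      = ((s.toList.length : Nat) : Int)
        + (((List.replicate (PySem.Str.count s " " * 2) ' ').length : Nat) : Int) - 1 := by
    simp
  simp only []
  rw [hi, hj, hinv, hfold, PySem.List.foldl_append_eq_flatMap]
  simp
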